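-- pv_equiv track=rewrite | github.com/rianpramudya/Tugas-Besar-TBA-2024 | tubesTBA2.py | parse_FA
-- ===== SOURCE A (Python) =====
-- subjek = ["aku", "kamu", "dia", "kita", "mereka"]
--
-- predikat = ["makan", "minum", "pergi", "baca", "nonton"]
--
-- obyek = ["nasi", "mineral", "kuliah", "koran", "film"]
--
-- ket = ["di rumah", "di kampus", "pada pagi hari", "pada siang hari", "pada malam hari"]
--
-- def recognize(buffer, kata):
--     return buffer in kata
--
-- def parse_FA(chars):
--     state = 'q0'
--     buffer = ""
--     tipeToken = []
--
--     subjek_chars = ['a', 'd', 'e', 'i', 'k', 'm', 'r', 't', 'u']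
--     predikat_chars = ['a', 'b', 'c', 'g', 'i', 'k', 'm', 'n', 'o', 'p', 'r', 't']
--     obyek_chars = ['a', 'f', 'i', 'k', 'l', 'm', 'n', 'o', 'r', 's', 'u']
--     ket_chars = ['a', 'd', 'g', 'h', 'i', 'j', 'k', 'l', 'm', 'n', 'p', 'r', 's', 'u']
--
--     for char in chars:
--         buffer += char
--         if state == 'q0' and buffer.strip() and buffer.strip()[-1] in subjek_chars and recognize(buffer.strip(), subjek):
--             state = 'q1'
--             tipeToken.append('S')
--             buffer = ""
--         elif state == 'q1' and buffer.strip() and buffer.strip()[-1] in predikat_chars and recognize(buffer.strip(), predikat):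
--             state = 'q2'
--             tipeToken.append('P')
--             buffer = ""
--         elif state == 'q2' and buffer.strip() and buffer.strip()[-1] in obyek_chars and recognize(buffer.strip(), obyek):
--             state = 'q3'
--             tipeToken.append('O')
--             buffer = ""
--         elif state == 'q2' and buffer.strip() and buffer.strip()[-1] in ket_chars and recognize(buffer.strip(), ket):
--             state = 'q3'
--             tipeToken.append('K')
--             buffer = ""
--         elif state == 'q3' and buffer.strip() and buffer.strip()[-1] in ket_chars and recognize(buffer.strip(), ket):
--             state = 'q4'
--             tipeToken.append('K')
--             buffer = ""
--         else:
--             continue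
--     return (state == 'q2' or state == 'q3' or state == 'q4'), tipeToken
-- ===== SOURCE B (Python) =====
-- SUBJEK = ["aku", "kamu", "dia", "kita", "mereka"]
-- PREDIKAT = ["makan", "minum", "pergi", "baca", "nonton"]
-- # 'kuliah' is deliberately absent: A's last-char class prefilter has no 'h'
-- # in obyek_chars, so A never accepts 'kuliah' as an obyek either.
-- OBYEK = ["nasi", "mineral", "koran", "film"]
-- KET = ["di rumah", "di kampus", "pada pagi hari", "pada siang hari", "pada malam hari"]
--
-- STAGES = [
--     [(w, 'S') for w in SUBJEK],
--     [(w, 'P') for w in PREDIKAT],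
--     [(w, 'O') for w in OBYEK] + [(w, 'K') for w in KET],
--     [(w, 'K') for w in KET],
-- ]
--
-- def parse_FA(chars):
--     # Staged greedy prefix matching: no per-character buffer/state loop.
--     # Each stage strips leading whitespace off the remaining input and
--     # consumes the one word (the sets are prefix-free) that starts it.
--     rest = chars
--     tokens = []
--     for stage in STAGES:
--         rest = rest.lstrip()
--         for w, label in stage:
--             if rest.startswith(w):
--                 tokens.append(label)
--                 rest = rest[len(w):]
--                 break
--         else:
--             break
--     return len(tokens) >= 2, tokens
-- ===== Notes on version B (the rewrite author's own statement) =====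
-- stated objective: faster
-- what changed: Replaced the per-character buffer-accumulating five-state cascade (which re-strips the whole growing buffer on every character) by staged greedy prefix matching on the remaining string: each of the at most four token stages lstrips the rest and consumes the unique prefix-free word that starts it; 'kuliah' is omitted from the obyek words since A's last-char prefilter never lets it match.
import Mathlib
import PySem

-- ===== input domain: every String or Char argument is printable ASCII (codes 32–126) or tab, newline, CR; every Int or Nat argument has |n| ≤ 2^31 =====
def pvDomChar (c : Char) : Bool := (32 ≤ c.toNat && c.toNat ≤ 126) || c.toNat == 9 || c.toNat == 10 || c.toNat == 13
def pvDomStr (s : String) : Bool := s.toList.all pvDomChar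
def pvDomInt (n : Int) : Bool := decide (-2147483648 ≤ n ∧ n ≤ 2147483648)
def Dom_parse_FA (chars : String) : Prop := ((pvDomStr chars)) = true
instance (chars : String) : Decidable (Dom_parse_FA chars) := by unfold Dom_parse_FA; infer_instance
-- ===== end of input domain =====

-- B replaces A's per-character buffer-accumulating five-state cascade (which re-strips the
-- whole growing buffer on every character) by staged greedy prefix matching on the remaining
-- string: each of at most four token stages lstrips the rest and consumes the one word of a
-- prefix-free word set that starts it ('kuliah' is omitted from the obyek words because A's
-- last-char class prefilter never lets it match); objective: faster.

-- ===== PORT A =====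
def pvSubjek : List (List Char) := ["aku".toList, "kamu".toList, "dia".toList, "kita".toList, "mereka".toList]
def pvPredikat : List (List Char) := ["makan".toList, "minum".toList, "pergi".toList, "baca".toList, "nonton".toList]
def pvObyek : List (List Char) := ["nasi".toList, "mineral".toList, "kuliah".toList, "koran".toList, "film".toList]
def pvKet : List (List Char) := ["di rumah".toList, "di kampus".toList, "pada pagi hari".toList, "pada siang hari".toList, "pada malam hari".toList]

def pvSubjekChars : List Char := ['a', 'd', 'e', 'i', 'k', 'm', 'r', 't', 'u']
def pvPredikatChars : List Char := ['a', 'b', 'c', 'g', 'i', 'k', 'm', 'n', 'o', 'p', 'r', 't']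
def pvObyekChars : List Char := ['a', 'f', 'i', 'k', 'l', 'm', 'n', 'o', 'r', 's', 'u']
def pvKetChars : List Char := ['a', 'd', 'g', 'h', 'i', 'j', 'k', 'l', 'm', 'n', 'p', 'r', 's', 'u']

-- buffer.strip()[-1] in cls; evaluated only under the `buffer.strip()` truthiness guard, so the
-- `none` (IndexError) arm is never reached — exact there.
def pvLastIn (s : List Char) (cls : List Char) : Bool :=
  match PySem.List.pyGet? s (-1) with
  | some c => decide (c ∈ cls)
  | none => false

def pvRecognize (buffer : List Char) (kata : List (List Char)) : Bool := decide (buffer ∈ kata)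

def parse_FA_stepA (st : String × List Char × List String) (char : Char) :
    String × List Char × List String :=
  let state := st.1
  let buffer := st.2.1 ++ [char]
  let tipeToken := st.2.2
  let s := PySem.Chars.strip buffer
  if state == "q0" && !s.isEmpty && pvLastIn s pvSubjekChars && pvRecognize s pvSubjek then
    ("q1", [], tipeToken ++ ["S"])
  else if state == "q1" && !s.isEmpty && pvLastIn s pvPredikatChars && pvRecognize s pvPredikat then
    ("q2", [], tipeToken ++ ["P"])
  else if state == "q2" && !s.isEmpty && pvLastIn s pvObyekChars && pvRecognize s pvObyek then
    ("q3", [], tipeToken ++ ["O"])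
  else if state == "q2" && !s.isEmpty && pvLastIn s pvKetChars && pvRecognize s pvKet then
    ("q3", [], tipeToken ++ ["K"])
  else if state == "q3" && !s.isEmpty && pvLastIn s pvKetChars && pvRecognize s pvKet then
    ("q4", [], tipeToken ++ ["K"])
  else
    (state, buffer, tipeToken)

def parse_FA (chars : String) : Bool × List String :=
  let fin := chars.toList.foldl parse_FA_stepA ("q0", [], [])
  ((fin.1 == "q2" || fin.1 == "q3" || fin.1 == "q4"), fin.2.2)

-- ===== PORT B =====
def pvSubjekB : List (List Char) := ["aku".toList, "kamu".toList, "dia".toList, "kita".toList, "mereka".toList]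
def pvPredikatB : List (List Char) := ["makan".toList, "minum".toList, "pergi".toList, "baca".toList, "nonton".toList]
-- 'kuliah' deliberately absent (A never accepts it: no 'h' in obyek_chars)
def pvObyekB : List (List Char) := ["nasi".toList, "mineral".toList, "koran".toList, "film".toList]
def pvKetB : List (List Char) := ["di rumah".toList, "di kampus".toList, "pada pagi hari".toList, "pada siang hari".toList, "pada malam hari".toList]

-- STAGES: the word-label comprehensions of Source B
def pvStage1 : List (List Char × String) := pvSubjekB.map (fun w => (w, "S"))
def pvStage2 : List (List Char × String) := pvPredikatB.map (fun w => (w, "P"))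
def pvStage3 : List (List Char × String) := pvObyekB.map (fun w => (w, "O")) ++ pvKetB.map (fun w => (w, "K"))
def pvStage4 : List (List Char × String) := pvKetB.map (fun w => (w, "K"))
def pvStages : List (List (List Char × String)) := [pvStage1, pvStage2, pvStage3, pvStage4]

-- the for-stage loop of Source B (inner for/break = find?; the for-else break ends the loop)
def parse_FA_go : List (List (List Char × String)) → List Char → List String → List String
  | [], _, toks => toks
  | stage :: stages, rest, toks =>
    let r := PySem.Chars.lstrip rest
    match stage.find? (fun t => PySem.Chars.startswith r t.1) with
    | some tw => parse_FA_go stages (r.drop tw.1.length) (toks ++ [tw.2])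
    | none => toks

def parse_FA_alt (chars : String) : Bool × List String :=
  let toks := parse_FA_go pvStages chars.toList []
  (decide (2 ≤ toks.length), toks)

-- ===== PRECONDITION & SPEC =====
def Spec_parse_FA (chars : String) (out : Bool × List String) : Prop := out = parse_FA_alt chars
instance (chars : String) (out : Bool × List String) : Decidable (Spec_parse_FA chars out) := by unfold Spec_parse_FA; infer_instance

-- ===== CLAIM (what is proved, stated in full; the proofs are below) =====
def Claim_equal_parse_FA : Prop := ∀ (chars : String), Dom_parse_FA chars → Spec_parse_FA chars (parse_FA chars)

-- ===== LEMMAS AND PROOFS =====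

-- A's word-test (truthiness + last-char class prefilter + list membership) equals membership in B's word list.
theorem pv_condS (s : List Char) :
    (!s.isEmpty && pvLastIn s pvSubjekChars && pvRecognize s pvSubjek) = decide (s ∈ pvSubjekB) := by
  by_cases h : s ∈ pvSubjek
  · simp only [pvSubjek, List.mem_cons, List.not_mem_nil, or_false] at h
    rcases h with h | h | h | h | h <;> subst h <;> decide
  · have h2 : s ∉ pvSubjekB := by
      simp only [pvSubjek, pvSubjekB, List.mem_cons] at h ⊢; tauto
    simp [pvRecognize, h, h2]

theorem pv_condP (s : List Char) :
    (!s.isEmpty && pvLastIn s pvPredikatChars && pvRecognize s pvPredikat) = decide (s ∈ pvPredikatB) := by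
  by_cases h : s ∈ pvPredikat
  · simp only [pvPredikat, List.mem_cons, List.not_mem_nil, or_false] at h
    rcases h with h | h | h | h | h <;> subst h <;> decide
  · have h2 : s ∉ pvPredikatB := by
      simp only [pvPredikat, pvPredikatB, List.mem_cons] at h ⊢; tauto
    simp [pvRecognize, h, h2]

theorem pv_condO (s : List Char) :
    (!s.isEmpty && pvLastIn s pvObyekChars && pvRecognize s pvObyek) = decide (s ∈ pvObyekB) := by
  by_cases h : s ∈ pvObyek
  · simp only [pvObyek, List.mem_cons, List.not_mem_nil, or_false] at h
    rcases h with h | h | h | h | h <;> subst h <;> decide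
  · have h2 : s ∉ pvObyekB := by
      simp only [pvObyek, pvObyekB, List.mem_cons] at h ⊢; tauto
    simp [pvRecognize, h, h2]

theorem pv_condK (s : List Char) :
    (!s.isEmpty && pvLastIn s pvKetChars && pvRecognize s pvKet) = decide (s ∈ pvKetB) := by
  by_cases h : s ∈ pvKet
  · simp only [pvKet, List.mem_cons, List.not_mem_nil, or_false] at h
    rcases h with h | h | h | h | h <;> subst h <;> decide
  · have h2 : s ∉ pvKetB := by
      simp only [pvKet, pvKetB, List.mem_cons] at h ⊢; tauto
    simp [pvRecognize, h, h2]

-- proof-side: the chain of (next-state, stage) pairs reachable from each state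
def pvChainOf (s : String) : List (String × List (List Char × String)) :=
  if s == "q0" then [("q1", pvStage1), ("q2", pvStage2), ("q3", pvStage3), ("q4", pvStage4)]
  else if s == "q1" then [("q2", pvStage2), ("q3", pvStage3), ("q4", pvStage4)]
  else if s == "q2" then [("q3", pvStage3), ("q4", pvStage4)]
  else if s == "q3" then [("q4", pvStage4)]
  else []

-- pvSim: B's staged matcher, additionally carrying the FA state (proof-side only)
def pvSim : String → List (String × List (List Char × String)) → List Char → List String → String × List String
  | s, [], _, toks => (s, toks)
  | s, (nxt, stage) :: ch, rest, toks =>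
    match stage.find? (fun t => PySem.Chars.startswith (PySem.Chars.lstrip rest) t.1) with
    | some tw => pvSim nxt ch ((PySem.Chars.lstrip rest).drop tw.1.length) (toks ++ [tw.2])
    | none => (s, toks)

def pvStageW (s : String) : List (List Char) :=
  match pvChainOf s with
  | [] => []
  | (_, st) :: _ => st.map Prod.fst

-- invariant: no prefix of the pending buffer already strips to a word of the current stage
def pvInv (s : String) (b : List Char) : Prop :=
  ∀ p, p <+: b → PySem.Chars.strip p ∉ pvStageW s

def pvIn5 (s : String) : Prop := s = "q0" ∨ s = "q1" ∨ s = "q2" ∨ s = "q3" ∨ s = "q4"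

def pvGood (s nxt : String) (stage : List (List Char × String)) : Prop :=
  pvChainOf s = (nxt, stage) :: pvChainOf nxt ∧ pvIn5 s ∧ pvIn5 nxt ∧
  stage.Pairwise (fun a b => ¬(a.1 <+: b.1) ∧ ¬(b.1 <+: a.1)) ∧
  ∀ t ∈ stage, t.1 ≠ [] ∧ PySem.Chars.lstrip t.1 = t.1 ∧ PySem.Chars.rstrip t.1 = t.1

theorem good_q0 : pvGood "q0" "q1" pvStage1 := by unfold pvGood pvIn5; refine ⟨by decide, ?_, ?_, by decide, by decide⟩ <;> simp
theorem good_q1 : pvGood "q1" "q2" pvStage2 := by unfold pvGood pvIn5; refine ⟨by decide, ?_, ?_, by decide, by decide⟩ <;> simp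
theorem good_q2 : pvGood "q2" "q3" pvStage3 := by unfold pvGood pvIn5; refine ⟨by decide, ?_, ?_, by decide, by decide⟩ <;> simp
theorem good_q3 : pvGood "q3" "q4" pvStage4 := by unfold pvGood pvIn5; refine ⟨by decide, ?_, ?_, by decide, by decide⟩ <;> simp

-- find? over a labelled word list: the equality test picks out membership
theorem pv_find_map (u : List Char) (ws : List (List Char)) (lab : String) :
    List.find? (fun t => u == t.1) (ws.map (fun w => (w, lab)))
      = if u ∈ ws then some (u, lab) else none := by
  induction ws with
  | nil => simp
  | cons w ws ih =>
    by_cases h : u = w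
    · subst h; simp
    · simp [h, ih, List.mem_cons]

theorem pv_find_map_append (u : List Char) (ws : List (List Char)) (lab : String)
    (rest : List (List Char × String)) :
    List.find? (fun t => u == t.1) (ws.map (fun w => (w, lab)) ++ rest)
      = if u ∈ ws then some (u, lab) else List.find? (fun t => u == t.1) rest := by
  induction ws with
  | nil => simp
  | cons w ws ih =>
    by_cases h : u = w
    · subst h; simp
    · simp [h, ih, List.mem_cons]

-- the step of A, expressed through the chain/stage of the current state
theorem pv_stepA_eq (s : String) (b : List Char) (c : Char) (toks : List String) :
    parse_FA_stepA (s, b, toks) c =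
      match pvChainOf s with
      | [] => (s, b ++ [c], toks)
      | (nxt, stage) :: _ =>
        match stage.find? (fun t => PySem.Chars.strip (b ++ [c]) == t.1) with
        | some tw => (nxt, [], toks ++ [tw.2])
        | none => (s, b ++ [c], toks) := by
  by_cases h0 : s = "q0"
  · subst h0
    have hf : List.find? (fun t => PySem.Chars.strip (b ++ [c]) == t.1) pvStage1
        = if PySem.Chars.strip (b ++ [c]) ∈ pvSubjekB
          then some (PySem.Chars.strip (b ++ [c]), "S") else none := pv_find_map _ _ _
    simp only [show pvChainOf "q0"
      = [("q1", pvStage1), ("q2", pvStage2), ("q3", pvStage3), ("q4", pvStage4)] from rfl, hf]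
    by_cases hm : PySem.Chars.strip (b ++ [c]) ∈ pvSubjekB
    · simp only [if_pos hm, parse_FA_stepA, pv_condS,
        show (("q0":String) == "q0") = true from by decide, Bool.true_and]
      simp [hm]
    · simp only [if_neg hm, parse_FA_stepA, pv_condS,
        show (("q0":String) == "q0") = true from by decide,
        show (("q0":String) == "q1") = false from by decide,
        show (("q0":String) == "q2") = false from by decide,
        show (("q0":String) == "q3") = false from by decide,
        Bool.true_and, Bool.false_and]
      simp [hm]
  by_cases h1 : s = "q1"
  · subst h1
    have hf : List.find? (fun t => PySem.Chars.strip (b ++ [c]) == t.1) pvStage2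
        = if PySem.Chars.strip (b ++ [c]) ∈ pvPredikatB
          then some (PySem.Chars.strip (b ++ [c]), "P") else none := pv_find_map _ _ _
    simp only [show pvChainOf "q1"
      = [("q2", pvStage2), ("q3", pvStage3), ("q4", pvStage4)] from rfl, hf]
    by_cases hm : PySem.Chars.strip (b ++ [c]) ∈ pvPredikatB
    · simp only [if_pos hm, parse_FA_stepA, pv_condP,
        show (("q1":String) == "q0") = false from by decide,
        show (("q1":String) == "q1") = true from by decide,
        Bool.true_and, Bool.false_and]
      simp [hm]
    · simp only [if_neg hm, parse_FA_stepA, pv_condP,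
        show (("q1":String) == "q0") = false from by decide,
        show (("q1":String) == "q1") = true from by decide,
        show (("q1":String) == "q2") = false from by decide,
        show (("q1":String) == "q3") = false from by decide,
        Bool.true_and, Bool.false_and]
      simp [hm]
  by_cases h2 : s = "q2"
  · subst h2
    have hf : List.find? (fun t => PySem.Chars.strip (b ++ [c]) == t.1) pvStage3
        = if PySem.Chars.strip (b ++ [c]) ∈ pvObyekB
          then some (PySem.Chars.strip (b ++ [c]), "O")
          else if PySem.Chars.strip (b ++ [c]) ∈ pvKetB
          then some (PySem.Chars.strip (b ++ [c]), "K") else none := by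
      rw [show pvStage3 = pvObyekB.map (fun w => (w, "O")) ++ pvKetB.map (fun w => (w, "K")) from rfl,
        pv_find_map_append, pv_find_map]
    simp only [show pvChainOf "q2" = [("q3", pvStage3), ("q4", pvStage4)] from rfl, hf]
    by_cases hO : PySem.Chars.strip (b ++ [c]) ∈ pvObyekB
    · simp only [if_pos hO, parse_FA_stepA, pv_condO,
        show (("q2":String) == "q0") = false from by decide,
        show (("q2":String) == "q1") = false from by decide,
        show (("q2":String) == "q2") = true from by decide,
        Bool.true_and, Bool.false_and]
      simp [hO]
    · by_cases hK : PySem.Chars.strip (b ++ [c]) ∈ pvKetB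
      · simp only [if_neg hO, if_pos hK, parse_FA_stepA, pv_condO, pv_condK,
          show (("q2":String) == "q0") = false from by decide,
          show (("q2":String) == "q1") = false from by decide,
          show (("q2":String) == "q2") = true from by decide,
          Bool.true_and, Bool.false_and]
        simp [hO, hK]
      · simp only [if_neg hO, if_neg hK, parse_FA_stepA, pv_condO, pv_condK,
          show (("q2":String) == "q0") = false from by decide,
          show (("q2":String) == "q1") = false from by decide,
          show (("q2":String) == "q2") = true from by decide,
          show (("q2":String) == "q3") = false from by decide,
          Bool.true_and, Bool.false_and]
        simp [hO, hK]
  by_cases h3 : s = "q3"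
  · subst h3
    have hf : List.find? (fun t => PySem.Chars.strip (b ++ [c]) == t.1) pvStage4
        = if PySem.Chars.strip (b ++ [c]) ∈ pvKetB
          then some (PySem.Chars.strip (b ++ [c]), "K") else none := pv_find_map _ _ _
    simp only [show pvChainOf "q3" = [("q4", pvStage4)] from rfl, hf]
    by_cases hm : PySem.Chars.strip (b ++ [c]) ∈ pvKetB
    · simp only [if_pos hm, parse_FA_stepA, pv_condK,
        show (("q3":String) == "q0") = false from by decide,
        show (("q3":String) == "q1") = false from by decide,
        show (("q3":String) == "q2") = false from by decide,
        show (("q3":String) == "q3") = true from by decide,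
        Bool.true_and, Bool.false_and]
      simp [hm]
    · simp only [if_neg hm, parse_FA_stepA, pv_condK,
        show (("q3":String) == "q0") = false from by decide,
        show (("q3":String) == "q1") = false from by decide,
        show (("q3":String) == "q2") = false from by decide,
        show (("q3":String) == "q3") = true from by decide,
        Bool.true_and, Bool.false_and]
      simp [hm]
  · have b0 : (s == "q0") = false := by simp [h0]
    have b1 : (s == "q1") = false := by simp [h1]
    have b2 : (s == "q2") = false := by simp [h2]
    have b3 : (s == "q3") = false := by simp [h3]
    have hc : pvChainOf s = [] := by simp [pvChainOf, h0, h1, h2, h3]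
    simp [parse_FA_stepA, hc, b0, b1, b2, b3]

-- ---- facts about lstrip / rstrip / strip (PySem.Chars) ----
theorem pv_lstrip_append (x y : List Char) :
    PySem.Chars.lstrip (x ++ y)
      = if (PySem.Chars.lstrip x).isEmpty then PySem.Chars.lstrip y else PySem.Chars.lstrip x ++ y :=
  List.dropWhile_append

theorem pv_rstrip_snoc_ws {c : Char} (y : List Char) (hc : PySem.Chars.isspace c = true) :
    PySem.Chars.rstrip (y ++ [c]) = PySem.Chars.rstrip y := by
  simp [PySem.Chars.rstrip, hc]

theorem pv_rstrip_snoc_nonws {c : Char} (y : List Char) (hc : PySem.Chars.isspace c = false) :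
    PySem.Chars.rstrip (y ++ [c]) = y ++ [c] := by
  simp [PySem.Chars.rstrip, hc]

theorem pv_strip_eq (x : List Char) :
    PySem.Chars.strip x = PySem.Chars.rstrip (PySem.Chars.lstrip x) := rfl

theorem pv_lstrip_snoc_nonws {c : Char} (x : List Char) (hc : PySem.Chars.isspace c = false) :
    PySem.Chars.lstrip (x ++ [c]) = PySem.Chars.lstrip x ++ [c] := by
  rw [pv_lstrip_append]
  by_cases h : (PySem.Chars.lstrip x).isEmpty
  · rw [if_pos h]
    rw [List.isEmpty_iff] at h
    rw [h]
    simp [PySem.Chars.lstrip, List.dropWhile, hc]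
  · rw [if_neg h]

theorem pv_strip_snoc_ws {c : Char} (x : List Char) (hc : PySem.Chars.isspace c = true) :
    PySem.Chars.strip (x ++ [c]) = PySem.Chars.strip x := by
  rw [pv_strip_eq, pv_strip_eq, pv_lstrip_append]
  by_cases h : (PySem.Chars.lstrip x).isEmpty
  · rw [if_pos h]
    rw [List.isEmpty_iff] at h
    rw [h]
    simp [PySem.Chars.lstrip, List.dropWhile, hc, PySem.Chars.rstrip]
  · rw [if_neg h, pv_rstrip_snoc_ws _ hc]

theorem pv_strip_snoc_nonws {c : Char} (x : List Char) (hc : PySem.Chars.isspace c = false) :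
    PySem.Chars.strip (x ++ [c]) = PySem.Chars.lstrip x ++ [c] := by
  rw [pv_strip_eq, pv_lstrip_snoc_nonws x hc, pv_rstrip_snoc_nonws _ hc]

theorem pv_lstrip_ws_prefix (p x : List Char) (hp : ∀ a ∈ p, PySem.Chars.isspace a = true) :
    PySem.Chars.lstrip (p ++ x) = PySem.Chars.lstrip x := by
  rw [pv_lstrip_append]
  have h : PySem.Chars.lstrip p = [] := List.dropWhile_eq_nil_iff.mpr hp
  rw [h]
  simp

-- find? by equality transfers to find? by prefix on an extension (prefix-free stage)
theorem pv_find_transfer (stage : List (List Char × String)) (u rest : List Char)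
    (hpf : stage.Pairwise (fun a b => ¬(a.1 <+: b.1) ∧ ¬(b.1 <+: a.1)))
    {tw : List Char × String}
    (h : List.find? (fun t => u == t.1) stage = some tw) :
    List.find? (fun t => PySem.Chars.startswith (u ++ rest) t.1) stage = some tw := by
  induction stage with
  | nil => simp at h
  | cons t stage ih =>
    cases ht : (u == t.1) with
    | true =>
      simp only [List.find?_cons, ht] at h
      have hsw : PySem.Chars.startswith (u ++ rest) t.1 = true := by
        rw [PySem.Chars.startswith_iff]
        exact (eq_of_beq ht) ▸ (List.prefix_append u rest)
      simp only [List.find?_cons, hsw]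
      exact h
    | false =>
      simp only [List.find?_cons, ht] at h
      have htw : tw ∈ stage := List.mem_of_find?_eq_some h
      have hu : u = tw.1 := eq_of_beq (List.find?_some (p := fun t : List Char × String => u == t.1) h)
      have hnp := (List.pairwise_cons.mp hpf).1 tw htw
      have hfalse : PySem.Chars.startswith (u ++ rest) t.1 = false := by
        by_contra hcon
        rw [Bool.not_eq_false, PySem.Chars.startswith_iff] at hcon
        have hu2 : tw.1 <+: u ++ rest := hu ▸ List.prefix_append u rest
        rcases List.prefix_or_prefix_of_prefix hcon hu2 with hx | hx
        · exact hnp.1 (hu ▸ hx)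
        · exact hnp.2 (hu ▸ hx)
      simp only [List.find?_cons, hfalse]
      exact ih (List.pairwise_cons.mp hpf).2 h

-- under the invariant, B's stage matcher is stuck on the pending buffer
theorem pv_stuck (s nxt : String) (stage : List (List Char × String)) (b : List Char)
    (hg : pvGood s nxt stage) (hInv : pvInv s b) :
    stage.find? (fun t => PySem.Chars.startswith (PySem.Chars.lstrip b) t.1) = none := by
  rw [List.find?_eq_none]
  intro t ht hsw
  rw [PySem.Chars.startswith_iff] at hsw
  have hws : ∀ a ∈ List.takeWhile PySem.Chars.isspace b, PySem.Chars.isspace a = true :=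
    fun a ha => List.mem_takeWhile_imp ha
  have hp : List.takeWhile PySem.Chars.isspace b ++ t.1 <+: b := by
    conv_rhs => rw [← List.takeWhile_append_dropWhile (p := PySem.Chars.isspace) (l := b)]
    exact (List.prefix_append_right_inj _).mpr hsw
  have hstrip : PySem.Chars.strip (List.takeWhile PySem.Chars.isspace b ++ t.1) = t.1 := by
    rw [pv_strip_eq, pv_lstrip_ws_prefix _ _ hws, (hg.2.2.2.2 t ht).2.1, (hg.2.2.2.2 t ht).2.2]
  have hmem : PySem.Chars.strip (List.takeWhile PySem.Chars.isspace b ++ t.1) ∈ pvStageW s := by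
    rw [hstrip]
    unfold pvStageW
    rw [hg.1]
    exact List.mem_map.mpr ⟨t, ht, rfl⟩
  exact hInv _ hp hmem

theorem pv_inv_nil (s : String) (h5 : pvIn5 s) : pvInv s [] := by
  intro p hp
  rw [List.prefix_nil] at hp
  subst hp
  rcases h5 with h | h | h | h | h <;> subst h <;> decide

-- the cons step of the main simulation, for a state with a live stage
theorem pv_sim_cons (c : Char) (cs' b : List Char) (toks : List String)
    (s nxt : String) (stage : List (List Char × String))
    (hg : pvGood s nxt stage) (hInv : pvInv s b)
    (IH : ∀ s' b' toks', pvIn5 s' → pvInv s' b' →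
      ((List.foldl parse_FA_stepA (s', b', toks') cs').1,
       (List.foldl parse_FA_stepA (s', b', toks') cs').2.2)
        = pvSim s' (pvChainOf s') (b' ++ cs') toks') :
    ((List.foldl parse_FA_stepA (s, b, toks) (c :: cs')).1,
     (List.foldl parse_FA_stepA (s, b, toks) (c :: cs')).2.2)
      = pvSim s (pvChainOf s) (b ++ c :: cs') toks := by
  rw [List.foldl_cons, pv_stepA_eq, hg.1]
  rcases hfind : stage.find? (fun t => PySem.Chars.strip (b ++ [c]) == t.1) with _ | tw
  · -- no transition fires: the buffer grows by c
    simp only [hfind]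
    have hInv' : pvInv s (b ++ [c]) := by
      intro p hp
      rcases List.prefix_concat_iff.mp hp with hp | hp
      · subst hp
        intro hmem
        unfold pvStageW at hmem
        rw [hg.1] at hmem
        rcases List.mem_map.mp hmem with ⟨t, ht, hteq⟩
        have hne := List.find?_eq_none.mp hfind t ht
        rw [hteq] at hne
        simp at hne
      · exact hInv p hp
    have := IH s (b ++ [c]) toks hg.2.1 hInv'
    rw [List.append_assoc, List.singleton_append, hg.1] at this
    exact this
  · -- the first matching word tw.1 = strip(b++[c]) is consumed
    simp only [hfind]
    have hu : PySem.Chars.strip (b ++ [c]) = tw.1 :=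
      eq_of_beq (List.find?_some (p := fun t : List Char × String => PySem.Chars.strip (b ++ [c]) == t.1) hfind)
    have htw : tw ∈ stage := List.mem_of_find?_eq_some hfind
    have hc : PySem.Chars.isspace c = false := by
      by_contra hcon
      rw [Bool.not_eq_false] at hcon
      have : PySem.Chars.strip b = tw.1 := by rw [← pv_strip_snoc_ws b hcon, hu]
      exact hInv b (List.prefix_refl b)
        (by rw [this]; unfold pvStageW; rw [hg.1]; exact List.mem_map.mpr ⟨tw, htw, rfl⟩)
    have hw : tw.1 = PySem.Chars.lstrip b ++ [c] := by rw [← hu, pv_strip_snoc_nonws b hc]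
    -- the remaining input after lstrip starts with tw.1
    have hr : PySem.Chars.lstrip (b ++ c :: cs') = tw.1 ++ cs' := by
      have h1 : b ++ c :: cs' = (b ++ [c]) ++ cs' := by simp
      have h2 : PySem.Chars.lstrip (b ++ [c]) = PySem.Chars.lstrip b ++ [c] :=
        pv_lstrip_snoc_nonws b hc
      rw [h1, pv_lstrip_append, h2]
      have : ((PySem.Chars.lstrip b ++ [c]).isEmpty) = false := by simp
      rw [this]
      simp [hw]
    have hfind2 : stage.find? (fun t => PySem.Chars.startswith
        (PySem.Chars.lstrip (b ++ c :: cs')) t.1) = some tw := by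
      rw [hr, ← hu]
      exact pv_find_transfer stage _ cs' hg.2.2.2.1 hfind
    show _ = pvSim s ((nxt, stage) :: pvChainOf nxt) (b ++ c :: cs') toks
    have hdrop : (PySem.Chars.lstrip (b ++ c :: cs')).drop tw.1.length = cs' := by
      rw [hr]; exact List.drop_left
    rw [pvSim]
    simp only [hfind2, hdrop]
    have := IH nxt [] (toks ++ [tw.2]) hg.2.2.1 (pv_inv_nil nxt hg.2.2.1)
    rw [List.nil_append] at this
    exact this

-- main simulation: A's fold, started at any reachable state with a compatible buffer,
-- produces exactly the state and tokens of B's staged matcher on buffer ++ input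
theorem pv_main : ∀ (cs : List Char) (s : String) (b : List Char) (toks : List String),
    pvIn5 s → pvInv s b →
    ((List.foldl parse_FA_stepA (s, b, toks) cs).1,
     (List.foldl parse_FA_stepA (s, b, toks) cs).2.2)
      = pvSim s (pvChainOf s) (b ++ cs) toks := by
  intro cs
  induction cs with
  | nil =>
    intro s b toks h5 hInv
    rw [List.foldl_nil, List.append_nil]
    rcases h5 with h | h | h | h | h
    · subst h; rw [show pvChainOf "q0" = ("q1", pvStage1) :: pvChainOf "q1" from good_q0.1,
        pvSim, pv_stuck _ _ _ b good_q0 hInv]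
    · subst h; rw [show pvChainOf "q1" = ("q2", pvStage2) :: pvChainOf "q2" from good_q1.1,
        pvSim, pv_stuck _ _ _ b good_q1 hInv]
    · subst h; rw [show pvChainOf "q2" = ("q3", pvStage3) :: pvChainOf "q3" from good_q2.1,
        pvSim, pv_stuck _ _ _ b good_q2 hInv]
    · subst h; rw [show pvChainOf "q3" = ("q4", pvStage4) :: pvChainOf "q4" from good_q3.1,
        pvSim, pv_stuck _ _ _ b good_q3 hInv]
    · subst h; rfl
  | cons c cs' ih =>
    intro s b toks h5 hInv
    rcases h5 with h | h | h | h | h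
    · subst h; exact pv_sim_cons c cs' b toks _ _ _ good_q0 hInv ih
    · subst h; exact pv_sim_cons c cs' b toks _ _ _ good_q1 hInv ih
    · subst h; exact pv_sim_cons c cs' b toks _ _ _ good_q2 hInv ih
    · subst h; exact pv_sim_cons c cs' b toks _ _ _ good_q3 hInv ih
    · subst h
      simp only [List.foldl_cons, pv_stepA_eq, show pvChainOf "q4" = [] from rfl]
      have hInv' : pvInv "q4" (b ++ [c]) := by intro p _; simp [pvStageW, pvChainOf]
      have := ih "q4" (b ++ [c]) toks (by right; right; right; right; rfl) hInv'
      rw [show pvChainOf "q4" = [] from rfl] at this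
      rw [List.append_assoc, List.singleton_append] at this
      exact this

-- the tokens of pvSim are exactly parse_FA_go over the stages
theorem pv_sim_snd : ∀ (ch : List (String × List (List Char × String))) (s : String)
    (cs : List Char) (toks : List String),
    (pvSim s ch cs toks).2 = parse_FA_go (ch.map Prod.snd) cs toks := by
  intro ch
  induction ch with
  | nil => intro s cs toks; rfl
  | cons e ch ih =>
    intro s cs toks
    obtain ⟨nxt, stage⟩ := e
    rw [List.map_cons]
    show (pvSim s ((nxt, stage) :: ch) cs toks).2 = parse_FA_go (stage :: ch.map Prod.snd) cs toks
    rw [pvSim, parse_FA_go]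
    rcases hf : stage.find? (fun t => PySem.Chars.startswith (PySem.Chars.lstrip cs) t.1) with _ | tw
    · simp [hf]
    · simp only [hf]
      exact ih nxt _ _

-- acceptance: the final state lies in {q2,q3,q4} iff at least two tokens were produced
theorem pv_acc (cs : List Char) :
    (((pvSim "q0" (pvChainOf "q0") cs []).1 == "q2")
      || ((pvSim "q0" (pvChainOf "q0") cs []).1 == "q3")
      || ((pvSim "q0" (pvChainOf "q0") cs []).1 == "q4"))
      = decide (2 ≤ (pvSim "q0" (pvChainOf "q0") cs []).2.length) := by
  rw [show pvChainOf "q0"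
    = [("q1", pvStage1), ("q2", pvStage2), ("q3", pvStage3), ("q4", pvStage4)] from rfl]
  rw [pvSim]
  rcases h1 : List.find? (fun t => PySem.Chars.startswith (PySem.Chars.lstrip cs) t.1) pvStage1
    with _ | t1
  · simp [h1]
  simp only [h1]
  generalize (PySem.Chars.lstrip cs).drop t1.1.length = cs1
  rw [pvSim]
  rcases h2 : List.find? (fun t => PySem.Chars.startswith (PySem.Chars.lstrip cs1) t.1) pvStage2
    with _ | t2
  · simp [h2]
  simp only [h2]
  generalize (PySem.Chars.lstrip cs1).drop t2.1.length = cs2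
  rw [pvSim]
  rcases h3 : List.find? (fun t => PySem.Chars.startswith (PySem.Chars.lstrip cs2) t.1) pvStage3
    with _ | t3
  · simp [h3]
  simp only [h3]
  generalize (PySem.Chars.lstrip cs2).drop t3.1.length = cs3
  rw [pvSim]
  rcases h4 : List.find? (fun t => PySem.Chars.startswith (PySem.Chars.lstrip cs3) t.1) pvStage4
    with _ | t4
  · simp [h4]
  simp only [h4]
  rw [pvSim]
  simp

-- ===== VERDICT (by name: the statement is the Claim_ definition above) =====
theorem parse_FA_spec : Claim_equal_parse_FA := by
  intro chars _
  unfold Spec_parse_FA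
  simp only [parse_FA, parse_FA_alt]
  have h := pv_main chars.toList "q0" [] [] (Or.inl rfl) (pv_inv_nil "q0" (Or.inl rfl))
  rw [List.nil_append] at h
  have h1 : (chars.toList.foldl parse_FA_stepA ("q0", [], [])).1
      = (pvSim "q0" (pvChainOf "q0") chars.toList []).1 := congrArg Prod.fst h
  have h2 : (chars.toList.foldl parse_FA_stepA ("q0", [], [])).2.2
      = (pvSim "q0" (pvChainOf "q0") chars.toList []).2 := congrArg Prod.snd h
  have hgo : (pvSim "q0" (pvChainOf "q0") chars.toList []).2
      = parse_FA_go pvStages chars.toList [] := by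
    rw [pv_sim_snd]
    rfl
  rw [h1, h2, pv_acc, hgo]
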